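-- pv_equiv track=rewrite | github.com/RedHatInsights/insights-host-inventory | app/tags_blueprint.py | combine_tags
-- ===== SOURCE A (Python) =====
-- def combine_tags(input_list, existing_dict=None):
--     """
--     Reformats a list of dictionaries into a nested dictionary structure and updates an existing dictionary additively.
--
--     Args:
--         input_list: List of dictionaries with 'namespace', 'key', and 'value' fields
--         existing_dict: Optional existing dictionary to update (default: None)
--
--     Returns:
--         Updated dictionary in the format {namespace: {key: [value, ...]}}
--     """
--     # Initialize result dictionary if none provided
--     result = existing_dict if existing_dict is not None else {}
--
--     # Process each item in the input list
--     for item in input_list: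
--         namespace = item.get("namespace")
--         key = item.get("key")
--         value = item.get("value")
--
--         # Skip invalid entries
--         if not all([namespace, key, value]):
--             continue
--
--         # Initialize namespace if not exists
--         if namespace not in result:
--             result[namespace] = {}
--
--         # Initialize key list if not exists
--         if key not in result[namespace]:
--             result[namespace][key] = []
--
--         # Add value if not already present
--         if value not in result[namespace][key]:
--             result[namespace][key].append(value)
--
--     return result
-- ===== SOURCE B (Python) =====
-- def combine_tags(input_list, existing_dict=None):
--     # Two-pass decomposition: first collect raw values per (namespace, key),
--     # then merge the collected structure into existing_dict with dedup at merge time.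
--     groups = {}
--     for item in input_list:
--         namespace = item.get("namespace")
--         key = item.get("key")
--         value = item.get("value")
--         if not all([namespace, key, value]):
--             continue
--         groups.setdefault(namespace, {}).setdefault(key, []).append(value)
--
--     result = existing_dict if existing_dict is not None else {}
--     for namespace, keymap in groups.items():
--         target = result.setdefault(namespace, {})
--         for key, vals in keymap.items():
--             lst = target.setdefault(key, [])
--             for v in vals:
--                 if v not in lst:
--                     lst.append(v)
--     return result
-- ===== Notes on version B (the rewrite author's own statement) =====
-- stated objective: alternative
-- what changed: A interleaves grouping, dedup and merging into the existing dict in one loop; B first collects raw values per (namespace, key) into a temporary nested dict in one pass, then merges that structure into existing_dict in a second pass, deduplicating only at merge time.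
import Mathlib
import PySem

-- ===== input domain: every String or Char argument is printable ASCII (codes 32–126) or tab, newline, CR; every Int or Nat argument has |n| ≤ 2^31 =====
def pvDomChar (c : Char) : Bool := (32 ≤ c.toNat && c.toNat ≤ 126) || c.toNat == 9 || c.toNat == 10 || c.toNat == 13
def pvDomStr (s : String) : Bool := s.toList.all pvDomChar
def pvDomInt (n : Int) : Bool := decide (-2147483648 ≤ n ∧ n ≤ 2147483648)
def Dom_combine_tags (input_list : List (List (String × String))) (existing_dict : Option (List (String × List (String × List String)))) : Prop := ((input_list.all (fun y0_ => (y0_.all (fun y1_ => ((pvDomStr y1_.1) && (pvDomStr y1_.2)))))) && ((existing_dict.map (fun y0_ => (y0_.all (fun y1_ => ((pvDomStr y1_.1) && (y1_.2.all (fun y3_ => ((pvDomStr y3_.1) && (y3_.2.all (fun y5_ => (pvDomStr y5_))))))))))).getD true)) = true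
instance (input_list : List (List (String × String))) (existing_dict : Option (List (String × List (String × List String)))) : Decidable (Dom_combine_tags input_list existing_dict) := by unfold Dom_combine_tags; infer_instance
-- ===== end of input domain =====

-- B replaces A's single loop (group + dedup + merge per item) by two passes: collect raw values
-- per (namespace, key) into a temporary nested dict, then merge that structure into the result,
-- deduplicating at merge time.  Same return value; in Python A mutates existing_dict in place and
-- B performs the same mutation — the equivalence proved here is about the return value.

abbrev PVD2 : Type := PySem.Dict String (List String)
abbrev PVD3 : Type := PySem.Dict String PVD2

-- shared input decoding: each item and the existing dict are Python dicts
def pvExtract (item : List (String × String)) : Option (String × String × String) :=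
  let d := PySem.Dict.ofList item
  match d.get? "namespace", d.get? "key", d.get? "value" with
  | some ns, some k, some v => if ns = "" ∨ k = "" ∨ v = "" then none else some (ns, k, v)
  | _, _, _ => none

def pvInitDict (existing_dict : Option (List (String × List (String × List String)))) : PVD3 :=
  match existing_dict with
  | some e => PySem.Dict.ofList (e.map (fun p => (p.1, PySem.Dict.ofList p.2)))
  | none => PySem.Dict.empty

-- ===== PORT A =====
-- A's loop body: ensure namespace, ensure key, append value if not present
def pvStepACore (r : PVD3) (ns k v : String) : PVD3 :=
  let r1 := if r.contains ns = false then r.insert ns PySem.Dict.empty else r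
  let inner1 := r1.getD ns PySem.Dict.empty
  let r2 := if inner1.contains k = false then r1.insert ns (inner1.insert k []) else r1
  let inner2 := r2.getD ns PySem.Dict.empty
  let vs := inner2.getD k []
  if v ∈ vs then r2 else r2.insert ns (inner2.insert k (vs ++ [v]))

def pvStepA (r : PVD3) (item : List (String × String)) : PVD3 :=
  match pvExtract item with
  | some (ns, k, v) => pvStepACore r ns k v
  | none => r

def combine_tags (input_list : List (List (String × String))) (existing_dict : Option (List (String × List (String × List String)))) : List (String × List (String × List String)) :=
  ((input_list.foldl pvStepA (pvInitDict existing_dict)).items).map (fun p => (p.1, p.2.items))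

-- ===== PORT B =====
-- pass 1 body: groups.setdefault(ns, {}).setdefault(k, []).append(v)  (no dedup)
def pvGStep (g : PVD3) (item : List (String × String)) : PVD3 :=
  match pvExtract item with
  | some (ns, k, v) =>
      let inner := g.getD ns PySem.Dict.empty
      g.insert ns (inner.insert k (inner.getD k [] ++ [v]))
  | none => g

-- pass 2: merge the collected structure into the result, deduplicating now
def pvDedupAppend (lst vals : List String) : List String :=
  vals.foldl (fun lst v => if v ∈ lst then lst else lst ++ [v]) lst

def pvMergeInner (tgt keymap : PVD2) : PVD2 :=
  keymap.items.foldl (fun tgt p => tgt.insert p.1 (pvDedupAppend (tgt.getD p.1 []) p.2)) tgt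

def pvMerge (res groups : PVD3) : PVD3 :=
  groups.items.foldl (fun res p => res.insert p.1 (pvMergeInner (res.getD p.1 PySem.Dict.empty) p.2)) res

def combine_tags_alt (input_list : List (List (String × String))) (existing_dict : Option (List (String × List (String × List String)))) : List (String × List (String × List String)) :=
  ((pvMerge (pvInitDict existing_dict) (input_list.foldl pvGStep PySem.Dict.empty)).items).map (fun p => (p.1, p.2.items))

-- ===== PRECONDITION & SPEC =====
def Spec_combine_tags (input_list : List (List (String × String))) (existing_dict : Option (List (String × List (String × List String)))) (out : List (String × List (String × List String))) : Prop := out = combine_tags_alt input_list existing_dict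
instance (input_list : List (List (String × String))) (existing_dict : Option (List (String × List (String × List String)))) (out : List (String × List (String × List String))) : Decidable (Spec_combine_tags input_list existing_dict out) := by unfold Spec_combine_tags; infer_instance

-- ===== CLAIM (what is proved, stated in full; the proofs are below) =====
def Claim_equal_combine_tags : Prop := ∀ (input_list : List (List (String × String))) (existing_dict : Option (List (String × List (String × List String)))), Dom_combine_tags input_list existing_dict → Spec_combine_tags input_list existing_dict (combine_tags input_list existing_dict)

-- ===== LEMMAS AND PROOFS =====

-- the well-formedness invariant both folds maintain: unique keys at both levels
def pvInv (r : PVD3) : Prop := r.keys.Nodup ∧ ∀ w ∈ r.values, w.keys.Nodup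

-- the generic one-level merge step both passes of B are instances of
def pvG {ν : Type} (m : ν → ν → ν) (dflt : ν) (r : PySem.Dict String ν) (p : String × ν) : PySem.Dict String ν :=
  r.insert p.1 (m (r.getD p.1 dflt) p.2)

theorem pv_map_update_id {ν : Type} (l : List (String × ν)) (k : String) (x : ν)
    (h : k ∉ l.map Prod.fst) :
    l.map (fun p => if (p.1 == k) = true then (k, x) else p) = l := by
  induction l with
  | nil => rfl
  | cons p l ih =>
    simp only [List.map_cons, List.mem_cons, not_or] at h
    have h1 : ¬ (p.1 == k) = true := by
      simp only [beq_iff_eq]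
      exact fun hh => h.1 hh.symm
    simp only [List.map_cons, if_neg h1, ih h.2]

theorem pv_insert_comm_of_contains {ν : Type} (r : PySem.Dict String ν) (k k' : String) (a b : ν)
    (hne : k ≠ k') (hk : r.contains k = true) :
    (r.insert k' a).insert k b = (r.insert k b).insert k' a := by
  have hkk' : ((k' : String) == k) = false := by
    simp only [beq_eq_false_iff_ne, ne_eq]
    exact fun hh => hne hh.symm
  have hk1 : (r.insert k' a).contains k = true := by
    rw [PySem.Dict.contains_insert]; simp [hk]
  by_cases h2 : r.contains k' = true
  · have hk2 : (r.insert k b).contains k' = true := by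
      rw [PySem.Dict.contains_insert]; simp [h2]
    apply PySem.Dict.ext
    rw [PySem.Dict.items_insert_of_contains _ _ hk1, PySem.Dict.items_insert_of_contains _ _ h2,
        PySem.Dict.items_insert_of_contains _ _ hk2, PySem.Dict.items_insert_of_contains _ _ hk,
        List.map_map, List.map_map]
    apply List.map_congr_left
    intro p _
    simp only [Function.comp_apply]
    by_cases hp' : (p.1 == k') = true
    · have hpe : p.1 = k' := by simpa [beq_iff_eq] using hp'
      have hpk : (p.1 == k) = false := by
        simp only [beq_eq_false_iff_ne, ne_eq, hpe]
        exact fun hh => hne hh.symm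
      simp [hp', hpk, hkk']
    · have hp'f : (p.1 == k') = false := by simpa using hp'
      by_cases hpk : (p.1 == k) = true
      · have hpe : p.1 = k := by simpa [beq_iff_eq] using hpk
        have hkk'2 : ((k : String) == k') = false := by
          simp only [beq_eq_false_iff_ne, ne_eq]; exact hne
        simp [hp'f, hpk, hkk'2]
      · have hpkf : (p.1 == k) = false := by simpa using hpk
        simp [hp'f, hpkf]
  · have h2f : r.contains k' = false := by simpa using h2
    have hk2 : (r.insert k b).contains k' = false := by
      rw [PySem.Dict.contains_insert]; simp [h2f, hkk']
    apply PySem.Dict.ext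
    rw [PySem.Dict.items_insert_of_contains _ _ hk1, PySem.Dict.items_insert_of_not_contains _ _ h2f,
        PySem.Dict.items_insert_of_not_contains _ _ hk2, PySem.Dict.items_insert_of_contains _ _ hk,
        List.map_append]
    simp
    exact fun hh => absurd hh.symm hne

theorem pv_insert_getD_self {ν : Type} (r : PySem.Dict String ν) (k : String) (dflt : ν)
    (hnd : r.keys.Nodup) (hk : r.contains k = true) :
    r.insert k (r.getD k dflt) = r := by
  apply PySem.Dict.ext
  rw [PySem.Dict.items_insert_of_contains _ _ hk]
  have h : ∀ p ∈ r.items, (if (p.1 == k) = true then (k, r.getD k dflt) else p) = id p := by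
    intro p hp
    by_cases hpk : (p.1 == k) = true
    · have hkp : p.1 = k := by simpa [beq_iff_eq] using hpk
      have hg : r.get? p.1 = some p.2 := PySem.Dict.get?_of_mem_items r hp hnd
      have hv : r.getD p.1 dflt = p.2 := by
        rw [PySem.Dict.getD_eq_get?_getD, hg]; rfl
      rw [if_pos hpk, ← hkp, hv]
      rfl
    · simp [hpk]
  rw [List.map_congr_left h, List.map_id]

theorem pv_getD_mem_values {ν : Type} (r : PySem.Dict String ν) (k : String) (dflt : ν)
    (hk : r.contains k = true) : r.getD k dflt ∈ r.values := by
  cases hw : r.get? k with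
  | none =>
    rw [PySem.Dict.get?_eq_none_iff_contains] at hw
    simp [hw] at hk
  | some w =>
    have hm := PySem.Dict.mem_items_of_get?_eq_some r hw
    rw [PySem.Dict.getD_eq_get?_getD, hw]
    simp only [Option.getD_some, PySem.Dict.values]
    exact List.mem_map.mpr ⟨(k, w), hm, rfl⟩

theorem pv_foldl_merge_comm {ν : Type} (m : ν → ν → ν) (dflt : ν) (st : ν → ν) (key : String)
    (post : List (String × ν)) (hkey : key ∉ post.map Prod.fst) :
    ∀ r : PySem.Dict String ν, r.contains key = true →
      post.foldl (pvG m dflt) (r.insert key (st (r.getD key dflt)))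
        = (post.foldl (pvG m dflt) r).insert key (st ((post.foldl (pvG m dflt) r).getD key dflt)) := by
  induction post with
  | nil => intro r _; simp
  | cons p post ih =>
    intro r hr
    simp only [List.map_cons, List.mem_cons, not_or] at hkey
    obtain ⟨hne, hkey'⟩ := hkey
    have hne' : p.1 ≠ key := fun hh => hne hh.symm
    have hstep : pvG m dflt (r.insert key (st (r.getD key dflt))) p
        = (pvG m dflt r p).insert key (st ((pvG m dflt r p).getD key dflt)) := by
      show (r.insert key (st (r.getD key dflt))).insert p.1
            (m ((r.insert key (st (r.getD key dflt))).getD p.1 dflt) p.2)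
          = (r.insert p.1 (m (r.getD p.1 dflt) p.2)).insert key
            (st ((r.insert p.1 (m (r.getD p.1 dflt) p.2)).getD key dflt))
      rw [PySem.Dict.getD_insert_of_ne _ _ _ hne', PySem.Dict.getD_insert_of_ne _ _ _ hne]
      exact (pv_insert_comm_of_contains r key p.1 (m (r.getD p.1 dflt) p.2)
        (st (r.getD key dflt)) hne hr).symm
    rw [List.foldl_cons, List.foldl_cons, hstep]
    refine ih hkey' (pvG m dflt r p) ?_
    show (r.insert p.1 (m (r.getD p.1 dflt) p.2)).contains key = true
    rw [PySem.Dict.contains_insert]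
    simp [hr]

theorem pv_foldl_merge_insert {ν μ : Type} (m : ν → ν → ν) (dflt : ν)
    (add : ν → μ → ν) (st : ν → μ → ν) (Q : ν → Prop)
    (hQd : Q dflt)
    (hcompat : ∀ tv gv x, Q gv → m tv (add gv x) = st (m tv gv) x)
    (hunit : ∀ tv, m tv dflt = tv)
    (g : PySem.Dict String ν) (hg : g.keys.Nodup) (hQg : ∀ w ∈ g.values, Q w)
    (d : PySem.Dict String ν) (key : String) (x : μ) :
    (g.insert key (add (g.getD key dflt) x)).items.foldl (pvG m dflt) d
      = (g.items.foldl (pvG m dflt) d).insert key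
          (st ((g.items.foldl (pvG m dflt) d).getD key dflt) x) := by
  by_cases hc : g.contains key = true
  · cases hget : g.get? key with
    | none =>
      rw [PySem.Dict.get?_eq_none_iff_contains] at hget
      simp [hget] at hc
    | some gv =>
      have hgv : g.getD key dflt = gv := by
        rw [PySem.Dict.getD_eq_get?_getD, hget]; rfl
      have hmem : (key, gv) ∈ g.items := PySem.Dict.mem_items_of_get?_eq_some g hget
      obtain ⟨pre, post, hsplit⟩ := List.append_of_mem hmem
      have hnd : (g.items.map Prod.fst).Nodup := by
        simpa [PySem.Dict.keys] using hg
      rw [hsplit, List.map_append, List.map_cons, List.nodup_append] at hnd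
      obtain ⟨-, hnd2, hdisj⟩ := hnd
      have hpost : key ∉ post.map Prod.fst := (List.nodup_cons.mp hnd2).1
      have hpre : key ∉ pre.map Prod.fst := fun hmem' => hdisj key hmem' key (by simp) rfl
      have hvmem : gv ∈ g.values := by
        simp only [PySem.Dict.values]
        exact List.mem_map.mpr ⟨(key, gv), hmem, rfl⟩
      have hitems : (g.insert key (add gv x)).items = pre ++ (key, add gv x) :: post := by
        rw [PySem.Dict.items_insert_of_contains _ _ hc, hsplit, List.map_append, List.map_cons]
        rw [pv_map_update_id pre key _ hpre, pv_map_update_id post key _ hpost]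
        simp
      rw [hgv, hitems, hsplit, List.foldl_append, List.foldl_append, List.foldl_cons,
        List.foldl_cons]
      have hQgv : Q gv := hQg gv hvmem
      have e1 : pvG m dflt (List.foldl (pvG m dflt) d pre) (key, add gv x)
          = (pvG m dflt (List.foldl (pvG m dflt) d pre) (key, gv)).insert key
              (st ((pvG m dflt (List.foldl (pvG m dflt) d pre) (key, gv)).getD key dflt) x) := by
        show (List.foldl (pvG m dflt) d pre).insert key
              (m ((List.foldl (pvG m dflt) d pre).getD key dflt) (add gv x))
            = ((List.foldl (pvG m dflt) d pre).insert key
                (m ((List.foldl (pvG m dflt) d pre).getD key dflt) gv)).insert key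
              (st (((List.foldl (pvG m dflt) d pre).insert key
                (m ((List.foldl (pvG m dflt) d pre).getD key dflt) gv)).getD key dflt) x)
        rw [hcompat _ _ _ hQgv, PySem.Dict.getD_insert_self, PySem.Dict.insert_insert_self]
      rw [e1]
      refine pv_foldl_merge_comm m dflt (fun t => st t x) key post hpost _ ?_
      show ((List.foldl (pvG m dflt) d pre).insert key
          (m ((List.foldl (pvG m dflt) d pre).getD key dflt) gv)).contains key = true
      exact PySem.Dict.contains_insert_self _ _ _
  · have hcf : g.contains key = false := by simpa using hc
    rw [PySem.Dict.getD_of_not_contains _ _ hcf, PySem.Dict.items_insert_of_not_contains _ _ hcf,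
      List.foldl_append, List.foldl_cons, List.foldl_nil]
    show (List.foldl (pvG m dflt) d g.items).insert key
          (m ((List.foldl (pvG m dflt) d g.items).getD key dflt) (add dflt x))
        = _
    rw [hcompat _ _ _ hQd, hunit]

-- value level: dedup-append of vals ++ [v]
theorem pv_dedupAppend_snoc (t l : List String) (v : String) :
    pvDedupAppend t (l ++ [v]) =
      (if v ∈ pvDedupAppend t l then pvDedupAppend t l else pvDedupAppend t l ++ [v]) := by
  simp [pvDedupAppend, List.foldl_append]

-- inner level: one collected (key, value) merged after the rest
theorem pv_mergeInner_insert (tgt keymap : PVD2) (k v : String) (h : keymap.keys.Nodup) :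
    pvMergeInner tgt (keymap.insert k (keymap.getD k [] ++ [v]))
      = (pvMergeInner tgt keymap).insert k
          (if v ∈ (pvMergeInner tgt keymap).getD k [] then (pvMergeInner tgt keymap).getD k []
           else (pvMergeInner tgt keymap).getD k [] ++ [v]) := by
  have hbridge : ∀ (t km : PVD2), pvMergeInner t km = km.items.foldl (pvG pvDedupAppend []) t :=
    fun _ _ => rfl
  rw [hbridge, hbridge]
  exact pv_foldl_merge_insert pvDedupAppend [] (fun l v => l ++ [v])
    (fun l v => if v ∈ l then l else l ++ [v]) (fun _ => True) trivial
    (fun tv gv x _ => pv_dedupAppend_snoc tv gv x) (fun _ => rfl) keymap h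
    (fun _ _ => trivial) tgt k v

-- the canonical form of one A-step
def pvStepC (r : PVD3) (ns k v : String) : PVD3 :=
  r.insert ns ((r.getD ns PySem.Dict.empty).insert k
    (if v ∈ (r.getD ns PySem.Dict.empty).getD k [] then (r.getD ns PySem.Dict.empty).getD k []
     else (r.getD ns PySem.Dict.empty).getD k [] ++ [v]))

-- outer level: one raw triple collected into the groups, then merged, is one A-step on the result
theorem pv_merge_gstep (d g : PVD3) (ns k v : String)
    (hg : g.keys.Nodup) (hgv : ∀ w ∈ g.values, w.keys.Nodup) :
    pvMerge d (g.insert ns ((g.getD ns PySem.Dict.empty).insert k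
        ((g.getD ns PySem.Dict.empty).getD k [] ++ [v])))
      = pvStepC (pvMerge d g) ns k v := by
  have hbridge : ∀ (r gg : PVD3),
      pvMerge r gg = gg.items.foldl (pvG pvMergeInner PySem.Dict.empty) r := fun _ _ => rfl
  rw [hbridge, hbridge]
  unfold pvStepC
  exact pv_foldl_merge_insert pvMergeInner PySem.Dict.empty
    (fun gv x => gv.insert x.1 (gv.getD x.1 [] ++ [x.2]))
    (fun tv x => tv.insert x.1
      (if x.2 ∈ tv.getD x.1 [] then tv.getD x.1 [] else tv.getD x.1 [] ++ [x.2]))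
    (fun gv => gv.keys.Nodup)
    (by simp [PySem.Dict.keys, PySem.Dict.empty])
    (fun tv gv x hQ => pv_mergeInner_insert tv gv x.1 x.2 hQ)
    (fun _ => rfl) g hg hgv d ns (k, v)

theorem pv_stepA_canonical (r : PVD3) (h : pvInv r) (ns k v : String) :
    pvStepACore r ns k v = pvStepC r ns k v := by
  simp only [pvStepACore, pvStepC]
  by_cases hns : r.contains ns = true
  · by_cases hk : (r.getD ns PySem.Dict.empty).contains k = true
    · by_cases hv : v ∈ (r.getD ns PySem.Dict.empty).getD k []
      · have hinner : (r.getD ns PySem.Dict.empty).keys.Nodup :=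
          h.2 _ (pv_getD_mem_values r ns PySem.Dict.empty hns)
        simp [hns, hk, hv]
        rw [pv_insert_getD_self _ _ _ hinner hk, pv_insert_getD_self _ _ _ h.1 hns]
      · simp [hns, hk, hv]
    · have hkf : (r.getD ns PySem.Dict.empty).contains k = false := by simpa using hk
      rw [PySem.Dict.getD_of_not_contains _ _ hkf]
      simp [hns, hkf, PySem.Dict.getD_insert_self, PySem.Dict.insert_insert_self]
  · have hnsf : r.contains ns = false := by simpa using hns
    rw [PySem.Dict.getD_of_not_contains _ _ hnsf]
    simp [hnsf, PySem.Dict.getD_insert_self, PySem.Dict.insert_insert_self,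
      PySem.Dict.contains_empty, PySem.Dict.getD_empty]

theorem pv_inv_empty : pvInv PySem.Dict.empty := by
  constructor
  · simp [PySem.Dict.keys, PySem.Dict.empty]
  · intro w hw
    simp [PySem.Dict.values, PySem.Dict.empty] at hw

theorem pv_inv_insert (r : PVD3) (h : pvInv r) (ns k : String) (L : List String) :
    pvInv (r.insert ns ((r.getD ns PySem.Dict.empty).insert k L)) := by
  constructor
  · exact PySem.Dict.nodup_keys_insert _ _ _ h.1
  · intro w hw
    rcases PySem.Dict.mem_values_insert _ _ _ _ hw with h1 | h2
    · subst h1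
      by_cases hns : r.contains ns = true
      · exact PySem.Dict.nodup_keys_insert _ _ _ (h.2 _ (pv_getD_mem_values r ns _ hns))
      · have he : r.getD ns PySem.Dict.empty = PySem.Dict.empty :=
          PySem.Dict.getD_of_not_contains _ _ (by simpa using hns)
        rw [he]
        exact PySem.Dict.nodup_keys_insert _ _ _ (by simp [PySem.Dict.keys, PySem.Dict.empty])
    · exact h.2 _ h2

theorem pv_inv_foldl_gstep' (l : List (List (String × String))) :
    ∀ d : PVD3, pvInv d → pvInv (l.foldl pvGStep d) := by
  induction l with
  | nil => intro d h; exact h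
  | cons item l ih =>
    intro d h
    rw [List.foldl_cons]
    apply ih
    cases hext : pvExtract item with
    | none =>
      have : pvGStep d item = d := by unfold pvGStep; rw [hext]
      rw [this]; exact h
    | some t =>
      obtain ⟨ns, k, v⟩ := t
      have : pvGStep d item = d.insert ns ((d.getD ns PySem.Dict.empty).insert k
          ((d.getD ns PySem.Dict.empty).getD k [] ++ [v])) := by
        unfold pvGStep; rw [hext]
      rw [this]
      exact pv_inv_insert d h ns k _

theorem pv_inv_foldl_gstep (l : List (List (String × String))) :
    pvInv (l.foldl pvGStep PySem.Dict.empty) :=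
  pv_inv_foldl_gstep' l PySem.Dict.empty pv_inv_empty

theorem pv_inv_stepC (r : PVD3) (h : pvInv r) (ns k v : String) : pvInv (pvStepC r ns k v) := by
  unfold pvStepC
  exact pv_inv_insert r h ns k _

theorem pv_inv_foldl_stepA (l : List (List (String × String))) (d : PVD3) (h : pvInv d) :
    pvInv (l.foldl pvStepA d) := by
  induction l generalizing d with
  | nil => exact h
  | cons item l ih =>
    rw [List.foldl_cons]
    apply ih
    cases hext : pvExtract item with
    | none =>
      have : pvStepA d item = d := by unfold pvStepA; rw [hext]
      rw [this]; exact h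
    | some t =>
      obtain ⟨ns, k, v⟩ := t
      have : pvStepA d item = pvStepACore d ns k v := by unfold pvStepA; rw [hext]
      rw [this, pv_stepA_canonical d h ns k v]
      exact pv_inv_stepC d h ns k v

theorem pv_values_P {ν : Type} (P : ν → Prop) (l : List (String × ν)) :
    ∀ d : PySem.Dict String ν, (∀ w ∈ d.values, P w) → (∀ p ∈ l, P p.2) →
      ∀ w ∈ (l.foldl (fun d p => d.insert p.1 p.2) d).values, P w := by
  induction l with
  | nil => intro d hd _; exact hd
  | cons p l ih =>
    intro d hd hl
    rw [List.foldl_cons]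
    apply ih
    · intro w hw
      rcases PySem.Dict.mem_values_insert _ _ _ _ hw with h1 | h2
      · subst h1; exact hl p (by simp)
      · exact hd _ h2
    · intro q hq; exact hl q (by simp [hq])

theorem pv_inv_init (e : Option (List (String × List (String × List String)))) :
    pvInv (pvInitDict e) := by
  cases e with
  | none => exact pv_inv_empty
  | some e =>
    constructor
    · exact PySem.Dict.nodup_keys_ofList _
    · have hl : ∀ p ∈ e.map (fun p => (p.1, PySem.Dict.ofList p.2)),
          (p.2 : PVD2).keys.Nodup := by
        intro p hp
        obtain ⟨q, -, hq⟩ := List.mem_map.mp hp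
        rw [← hq]
        exact PySem.Dict.nodup_keys_ofList _
      exact pv_values_P (fun w : PVD2 => w.keys.Nodup) _ PySem.Dict.empty pv_inv_empty.2 hl

theorem pv_main (l : List (List (String × String))) (d : PVD3) (h : pvInv d) :
    pvMerge d (l.foldl pvGStep PySem.Dict.empty) = l.foldl pvStepA d := by
  induction l using List.reverseRecOn with
  | nil => rfl
  | append_singleton l item ih =>
    rw [List.foldl_append, List.foldl_append, List.foldl_cons, List.foldl_nil,
      List.foldl_cons, List.foldl_nil]
    cases hext : pvExtract item with
    | none =>
      have hA : pvStepA (List.foldl pvStepA d l) item = List.foldl pvStepA d l := by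
        unfold pvStepA; rw [hext]
      have hG : pvGStep (List.foldl pvGStep PySem.Dict.empty l) item
          = List.foldl pvGStep PySem.Dict.empty l := by
        unfold pvGStep; rw [hext]
      rw [hA, hG, ih]
    | some t =>
      obtain ⟨ns, k, v⟩ := t
      have hA : pvStepA (List.foldl pvStepA d l) item
          = pvStepACore (List.foldl pvStepA d l) ns k v := by
        unfold pvStepA; rw [hext]
      have hG : pvGStep (List.foldl pvGStep PySem.Dict.empty l) item
          = (List.foldl pvGStep PySem.Dict.empty l).insert ns
              (((List.foldl pvGStep PySem.Dict.empty l).getD ns PySem.Dict.empty).insert k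
                (((List.foldl pvGStep PySem.Dict.empty l).getD ns PySem.Dict.empty).getD k []
                  ++ [v])) := by
        unfold pvGStep; rw [hext]
      have hginv := pv_inv_foldl_gstep l
      rw [hA, hG, pv_merge_gstep d _ ns k v hginv.1 hginv.2, ih,
        pv_stepA_canonical _ (pv_inv_foldl_stepA l d h) ns k v]

-- ===== VERDICT (by name: the statement is the Claim_ definition above) =====
theorem combine_tags_spec : Claim_equal_combine_tags := by
  intro input_list existing_dict _
  unfold Spec_combine_tags combine_tags combine_tags_alt
  rw [pv_main input_list (pvInitDict existing_dict) (pv_inv_init existing_dict)]
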